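-- pv_equiv track=rewrite | github.com/Joemasch/Misinfo-Arena | src/arena/config.py | get_default_model_index
-- ===== SOURCE A (Python) =====
-- from typing import List
--
-- AVAILABLE_MODELS = [
--     # ── Tier 1: Cheap — use for bulk experiments ──
--     "gemini-2.0-flash",           # Google   — $0.10/$0.40 per 1M tokens (cheapest)
--     "gpt-4o-mini",                # OpenAI   — $0.15/$0.60
--     "grok-3-mini",                # xAI      — $0.30/$0.50
--     # ── Tier 2: Mid-range ──
--     "claude-haiku-4-5-20251001",  # Anthropic — $0.80/$4.00
--     "gemini-2.5-flash",           # Google   — $0.15/$3.50 (strong reasoning)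
--     # ── Tier 3: Premium — use selectively ──
--     "gpt-4o",                     # OpenAI   — $2.50/$10.00
--     "gemini-2.5-pro",             # Google   — $1.25/$10.00
--     "claude-sonnet-4-20250514",   # Anthropic — $3.00/$15.00
--     "grok-3",                     # xAI      — $3.00/$15.00
--     # ── Legacy ──
--     "gpt-4-turbo",
--     "gpt-3.5-turbo",
-- ]
--
-- def get_default_model_index(models: List[str] = None) -> int:
--     """
--     Get the default model index, preferring certain models in order.
--
--     Args:
--         models: List of available models. If None, uses AVAILABLE_MODELS.
--
--     Returns:
--         Index of the preferred default model, or last model if none preferred.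
--     """
--     if models is None:
--         models = AVAILABLE_MODELS
--
--     # Prefer explicit models in order (newest/best first)
--     preferred = ["gpt-4.0", "gpt-4o", "gpt-4.1", "gpt-4", "gpt-4.1-mini"]
--     for p in preferred:
--         if p in models:
--             return models.index(p)
--     # Otherwise default to the last model (treat list as ordered oldest->newest)
--     return max(0, len(models) - 1)
-- ===== SOURCE B (Python) =====
-- AVAILABLE_MODELS = [
--     "gemini-2.0-flash",
--     "gpt-4o-mini",
--     "grok-3-mini",
--     "claude-haiku-4-5-20251001",
--     "gemini-2.5-flash",
--     "gpt-4o",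
--     "gemini-2.5-pro",
--     "claude-sonnet-4-20250514",
--     "grok-3",
--     "gpt-4-turbo",
--     "gpt-3.5-turbo",
-- ]
--
-- def get_default_model_index(models=None):
--     if models is None:
--         models = AVAILABLE_MODELS
--     preferred = ["gpt-4.0", "gpt-4o", "gpt-4.1", "gpt-4", "gpt-4.1-mini"]
--     rank = {p: i for i, p in enumerate(preferred)}
--     best = None  # (preference rank, index) of best model seen so far
--     for i, name in enumerate(models):
--         r = rank.get(name)
--         if r is not None and (best is None or r < best[0]):
--             best = (r, i)
--     if best is not None:
--         return best[1]
--     return max(0, len(models) - 1)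
-- ===== Notes on version B (the rewrite author's own statement) =====
-- stated objective: idiomatic
-- what changed: A loops over the preferred names, scanning models twice per name (membership test then .index); B builds a rank dict over the preferred names once and makes a single pass over models tracking the index with the smallest preference rank (strict < keeps the earliest index, matching A's first-occurrence tie-breaking).
import Mathlib
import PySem

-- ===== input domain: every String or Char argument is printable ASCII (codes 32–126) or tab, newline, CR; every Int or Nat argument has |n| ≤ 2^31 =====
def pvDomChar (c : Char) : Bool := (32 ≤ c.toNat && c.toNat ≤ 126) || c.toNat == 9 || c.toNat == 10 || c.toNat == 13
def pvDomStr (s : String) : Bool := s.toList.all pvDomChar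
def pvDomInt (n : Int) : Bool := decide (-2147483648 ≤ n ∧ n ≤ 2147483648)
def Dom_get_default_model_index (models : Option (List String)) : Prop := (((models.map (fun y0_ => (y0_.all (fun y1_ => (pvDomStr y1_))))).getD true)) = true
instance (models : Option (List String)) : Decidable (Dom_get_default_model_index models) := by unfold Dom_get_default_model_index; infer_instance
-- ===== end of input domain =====

-- B replaces A's loop over the preferred names (each iteration scanning models twice: membership
-- test plus .index) by a rank dictionary and ONE pass over models tracking the index with the
-- smallest preference rank (objective: idiomatic single-pass argmin; same result, same tie-breaking).

-- ===== PORT A =====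
def pvAvailableModels : List String :=
  ["gemini-2.0-flash", "gpt-4o-mini", "grok-3-mini", "claude-haiku-4-5-20251001",
   "gemini-2.5-flash", "gpt-4o", "gemini-2.5-pro", "claude-sonnet-4-20250514",
   "grok-3", "gpt-4-turbo", "gpt-3.5-turbo"]
def pvPreferred : List String := ["gpt-4.0", "gpt-4o", "gpt-4.1", "gpt-4", "gpt-4.1-mini"]
-- 'for p in preferred': first p with 'p in models' returns models.index(p)
-- (the guard 'p ∈ ms' makes index? a some; the getD 0 default is never taken)
def pvALoop (ms : List String) : List String → Int
  | [] => max 0 (PySem.List.len ms - 1)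
  | p :: ps => if p ∈ ms then (((PySem.List.index? ms p).getD 0 : Nat) : Int) else pvALoop ms ps
def get_default_model_index (models : Option (List String)) : Int :=
  let ms := models.getD pvAvailableModels
  pvALoop ms pvPreferred
-- ===== PORT B =====
-- rank = {p: i for i, p in enumerate(preferred)}
def pvRank : PySem.Dict String Int :=
  (PySem.List.enumerate pvPreferred 0).foldl (fun d p => d.insert p.2 p.1) PySem.Dict.empty
-- loop body: keep the (rank, index) with the strictly smallest rank seen so far
def pvBStep (best : Option (Int × Int)) (p : Int × String) : Option (Int × Int) :=
  match pvRank.get? p.2 with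
  | none => best
  | some r =>
    match best with
    | none => some (r, p.1)
    | some b => if r < b.1 then some (r, p.1) else best
def get_default_model_index_alt (models : Option (List String)) : Int :=
  let ms := models.getD pvAvailableModels
  match (PySem.List.enumerate ms 0).foldl pvBStep none with
  | some b => b.2
  | none => max 0 (PySem.List.len ms - 1)


-- ===== PRECONDITION & SPEC =====
def Spec_get_default_model_index (models : Option (List String)) (out : Int) : Prop := out = get_default_model_index_alt models
instance (models : Option (List String)) (out : Int) : Decidable (Spec_get_default_model_index models out) := by unfold Spec_get_default_model_index; infer_instance

-- ===== CLAIM (what is proved, stated in full; the proofs are below) =====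
def Claim_equal_get_default_model_index : Prop := ∀ (models : Option (List String)), Dom_get_default_model_index models → Spec_get_default_model_index models (get_default_model_index models)

-- ===== LEMMAS AND PROOFS =====

theorem pvRank_get (x : String) : pvRank.get? x =
    if "gpt-4.0" = x then some 0 else if "gpt-4o" = x then some 1 else if "gpt-4.1" = x then some 2
    else if "gpt-4" = x then some 3 else if "gpt-4.1-mini" = x then some 4 else none := by
  have h : pvRank = PySem.Dict.mk [("gpt-4.0",0),("gpt-4o",1),("gpt-4.1",2),("gpt-4",3),("gpt-4.1-mini",4)] := by decide
  rw [h]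
  simp only [PySem.Dict.get?_mk_cons, beq_iff_eq]
  rfl

theorem pvRank_cases (x : String) (r : Int) (h : pvRank.get? x = some r) :
    (x = "gpt-4.0" ∧ r = 0) ∨ (x = "gpt-4o" ∧ r = 1) ∨ (x = "gpt-4.1" ∧ r = 2) ∨
    (x = "gpt-4" ∧ r = 3) ∨ (x = "gpt-4.1-mini" ∧ r = 4) := by
  rw [pvRank_get] at h
  split_ifs at h with h1 h2 h3 h4 h5 <;> injection h with h <;> subst_vars <;> simp

theorem pvRank_iff (q : String) (r : Int) (hq : pvRank.get? q = some r) (x : String) :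
    pvRank.get? x = some r ↔ x = q := by
  constructor
  · intro hx
    rcases pvRank_cases x r hx with ⟨hxe, rfl⟩|⟨hxe, rfl⟩|⟨hxe, rfl⟩|⟨hxe, rfl⟩|⟨hxe, rfl⟩ <;>
      rcases pvRank_cases q _ hq with ⟨hqe, hr⟩|⟨hqe, hr⟩|⟨hqe, hr⟩|⟨hqe, hr⟩|⟨hqe, hr⟩ <;>
      first | (subst_vars; rfl) | omega
  · rintro rfl; exact hq

theorem pvFold_keep (xs : List String) (s : Int) (b : Int × Int)
    (h : ∀ x ∈ xs, ∀ r, pvRank.get? x = some r → b.1 ≤ r) :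
    (PySem.List.enumerate xs s).foldl pvBStep (some b) = some b := by
  induction xs generalizing s with
  | nil => simp [PySem.List.enumerate_nil]
  | cons x xs ih =>
    rw [PySem.List.enumerate_cons]
    simp only [List.foldl_cons]
    have hx : pvBStep (some b) (s, x) = some b := by
      unfold pvBStep
      cases hr : pvRank.get? x with
      | none => rfl
      | some r =>
        have := h x (by simp) r hr
        simp only []
        rw [if_neg (by omega)]
    rw [hx]
    exact ih (s + 1) (fun y hy r hr => h y (by simp [hy]) r hr)

theorem pvFold_min (xs : List String) (s : Int) (acc : Option (Int × Int)) (r : Int) (j : Nat)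
    (hmin : ∀ x ∈ xs, ∀ r', pvRank.get? x = some r' → r ≤ r')
    (hacc : ∀ b, acc = some b → r < b.1)
    (hfind : xs.findIdx? (fun x => pvRank.get? x == some r) = some j) :
    (PySem.List.enumerate xs s).foldl pvBStep acc = some (r, s + (j : Int)) := by
  induction xs generalizing s acc j with
  | nil => simp at hfind
  | cons x xs ih =>
    rw [List.findIdx?_cons] at hfind
    rw [PySem.List.enumerate_cons]
    simp only [List.foldl_cons]
    split_ifs at hfind with hc
    · have hx : pvRank.get? x = some r := by simpa using hc
      injection hfind with hj; subst hj
      have hstep : pvBStep acc (s, x) = some (r, s) := by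
        unfold pvBStep
        cases hac : acc with
        | none => simp only [hx]
        | some b => simp only [hx]; rw [if_pos (hacc b hac)]
      rw [hstep, pvFold_keep xs (s+1) (r, s) (fun y hy r' hr' => hmin y (by simp [hy]) r' hr')]
      simp
    · have hx : pvRank.get? x ≠ some r := by simpa using hc
      rcases Option.map_eq_some_iff.mp hfind with ⟨j', hj', rfl⟩
      have hacc' : ∀ b, pvBStep acc (s, x) = some b → r < b.1 := by
        intro b hb
        unfold pvBStep at hb
        cases hr0 : pvRank.get? x with
        | none => rw [hr0] at hb; exact hacc b hb
        | some r0 =>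
          have hlt : r < r0 := by
            rcases lt_or_eq_of_le (hmin x (by simp) r0 hr0) with h | h
            · exact h
            · exact absurd (h ▸ hr0) hx
          cases hac : acc with
          | none =>
            simp only [hr0, hac] at hb
            injection hb with hb; rw [← hb]; exact hlt
          | some b0 =>
            simp only [hr0, hac] at hb
            split_ifs at hb with hcmp
            · injection hb with hb; rw [← hb]; exact hlt
            · injection hb with hb; rw [← hb]; exact hacc b0 hac
      have := ih (s + 1) (pvBStep acc (s, x)) j'
        (fun y hy r' hr' => hmin y (by simp [hy]) r' hr') hacc' hj'
      rw [this]
      simp only [Option.some.injEq, Prod.mk.injEq, true_and]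
      push_cast
      omega

theorem pvFold_none (xs : List String) (s : Int)
    (h : ∀ x ∈ xs, pvRank.get? x = none) :
    (PySem.List.enumerate xs s).foldl pvBStep none = none := by
  induction xs generalizing s with
  | nil => simp [PySem.List.enumerate_nil]
  | cons x xs ih =>
    rw [PySem.List.enumerate_cons]
    simp only [List.foldl_cons]
    have hx : pvBStep none (s, x) = none := by
      unfold pvBStep; rw [h x (by simp)]
    rw [hx]
    exact ih (s + 1) (fun y hy => h y (by simp [hy]))

theorem pvFindIdx_eq_index? (p : String) (r : Int)
    (hp : ∀ x, pvRank.get? x = some r ↔ x = p) (ms : List String) :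
    ms.findIdx? (fun x => pvRank.get? x == some r) = PySem.List.index? ms p := by
  have hfun : (fun x => pvRank.get? x == some r) = (fun x : String => x == p) := by
    funext x
    by_cases hx : x = p
    · subst hx; simp [(hp x).2 rfl]
    · have hne : pvRank.get? x ≠ some r := fun hc => hx ((hp x).1 hc)
      simp [hne, hx]
  rw [PySem.List.index?_eq_idxOf?, hfun]
  rfl

theorem pvCase (ms : List String) (p : String) (r : Int)
    (hp : ∀ x, pvRank.get? x = some r ↔ x = p)
    (hmin : ∀ x ∈ ms, ∀ r', pvRank.get? x = some r' → r ≤ r')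
    (hmem : p ∈ ms) :
    (PySem.List.enumerate ms 0).foldl pvBStep none
      = some (r, (((PySem.List.index? ms p).getD 0 : Nat) : Int)) := by
  obtain ⟨j, hj⟩ := Option.isSome_iff_exists.mp ((PySem.List.index?_isSome_iff ms p).mpr hmem)
  rw [pvFold_min ms 0 none r j hmin (by simp) (by rw [pvFindIdx_eq_index? p r hp]; exact hj), hj]
  simp

theorem pvNotMem_min (ms : List String) (r : Int)
    (h : ∀ q r', pvRank.get? q = some r' → r' < r → q ∉ ms) :
    ∀ x ∈ ms, ∀ r', pvRank.get? x = some r' → r ≤ r' := by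
  intro x hx r' hr'
  by_contra hlt
  exact h x r' hr' (by omega) hx

theorem pvMain : ∀ models : Option (List String),
    get_default_model_index models = get_default_model_index_alt models := by
  intro models
  unfold get_default_model_index get_default_model_index_alt
  set ms := models.getD pvAvailableModels with hms
  simp only [pvPreferred, pvALoop]
  by_cases h0 : "gpt-4.0" ∈ ms
  · rw [if_pos h0, pvCase ms "gpt-4.0" 0 (pvRank_iff _ _ (by decide))
      (pvNotMem_min ms 0 (by
        intro q r' hq hlt
        rcases pvRank_cases q r' hq with ⟨rfl, rfl⟩|⟨rfl, rfl⟩|⟨rfl, rfl⟩|⟨rfl, rfl⟩|⟨rfl, rfl⟩ <;> omega)) h0]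
  · rw [if_neg h0]
    by_cases h1 : "gpt-4o" ∈ ms
    · rw [if_pos h1, pvCase ms "gpt-4o" 1 (pvRank_iff _ _ (by decide))
        (pvNotMem_min ms 1 (by
          intro q r' hq hlt
          rcases pvRank_cases q r' hq with ⟨rfl, rfl⟩|⟨rfl, rfl⟩|⟨rfl, rfl⟩|⟨rfl, rfl⟩|⟨rfl, rfl⟩ <;>
            first | omega | exact h0)) h1]
    · rw [if_neg h1]
      by_cases h2 : "gpt-4.1" ∈ ms
      · rw [if_pos h2, pvCase ms "gpt-4.1" 2 (pvRank_iff _ _ (by decide))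
          (pvNotMem_min ms 2 (by
            intro q r' hq hlt
            rcases pvRank_cases q r' hq with ⟨rfl, rfl⟩|⟨rfl, rfl⟩|⟨rfl, rfl⟩|⟨rfl, rfl⟩|⟨rfl, rfl⟩ <;>
              first | omega | exact h0 | exact h1)) h2]
      · rw [if_neg h2]
        by_cases h3 : "gpt-4" ∈ ms
        · rw [if_pos h3, pvCase ms "gpt-4" 3 (pvRank_iff _ _ (by decide))
            (pvNotMem_min ms 3 (by
              intro q r' hq hlt
              rcases pvRank_cases q r' hq with ⟨rfl, rfl⟩|⟨rfl, rfl⟩|⟨rfl, rfl⟩|⟨rfl, rfl⟩|⟨rfl, rfl⟩ <;>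
                first | omega | exact h0 | exact h1 | exact h2)) h3]
        · rw [if_neg h3]
          by_cases h4 : "gpt-4.1-mini" ∈ ms
          · rw [if_pos h4, pvCase ms "gpt-4.1-mini" 4 (pvRank_iff _ _ (by decide))
              (pvNotMem_min ms 4 (by
                intro q r' hq hlt
                rcases pvRank_cases q r' hq with ⟨rfl, rfl⟩|⟨rfl, rfl⟩|⟨rfl, rfl⟩|⟨rfl, rfl⟩|⟨rfl, rfl⟩ <;>
                  first | omega | exact h0 | exact h1 | exact h2 | exact h3)) h4]
          · rw [if_neg h4]
            have hall : ∀ x ∈ ms, pvRank.get? x = none := by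
              intro x hx
              cases hrx : pvRank.get? x with
              | none => rfl
              | some r =>
                rcases pvRank_cases x r hrx with ⟨rfl, -⟩|⟨rfl, -⟩|⟨rfl, -⟩|⟨rfl, -⟩|⟨rfl, -⟩ <;>
                  first | exact absurd hx h0 | exact absurd hx h1 | exact absurd hx h2 | exact absurd hx h3 | exact absurd hx h4
            rw [pvFold_none ms 0 hall]

-- ===== VERDICT (by name: the statement is the Claim_ definition above) =====
theorem get_default_model_index_spec : Claim_equal_get_default_model_index := by
  intro models _
  unfold Spec_get_default_model_index
  exact pvMain models
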